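-- pv_equiv track=rewrite | github.com/HadiOnZero/mass-zone-h | mobile/src/utils/mobile_helpers.py | sanitize_url_mobile
-- ===== SOURCE A (Python) =====
-- def sanitize_url_mobile(url):
--     """Sanitasi URL untuk keamanan di mobile"""
--     if not url:
--         return ""
--
--     # Remove whitespace and dangerous characters
--     url = url.strip()
--
--     # Remove potentially dangerous characters
--     dangerous_chars = ['<', '>', '"', "'", '&', '%', '$', '#', '{', '}', '[', ']', '\\', '^', '`']
--     for char in dangerous_chars:
--         url = url.replace(char, '')
--
--     # Add protocol if missing
--     if not url.startswith(('http://', 'https://')):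
--         url = 'http://' + url
--
--     # Remove trailing slash
--     url = url.rstrip('/')
--
--     return url
-- ===== SOURCE B (Python) =====
-- DANGEROUS = set('<>"\'&%$#{}[]\\^`')
--
-- def sanitize_url_mobile(url):
--     """Sanitasi URL untuk keamanan di mobile (single-pass character filter)"""
--     if not url:
--         return ""
--     url = ''.join(c for c in url.strip() if c not in DANGEROUS)
--     if not url.startswith(('http://', 'https://')):
--         url = 'http://' + url
--     return url.rstrip('/')
-- ===== Notes on version B (the rewrite author's own statement) =====
-- stated objective: idiomatic
-- what changed: Replaces the fifteen sequential str.replace passes over the whole URL with a single filtering traversal against a set of dangerous characters.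
import Mathlib
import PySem

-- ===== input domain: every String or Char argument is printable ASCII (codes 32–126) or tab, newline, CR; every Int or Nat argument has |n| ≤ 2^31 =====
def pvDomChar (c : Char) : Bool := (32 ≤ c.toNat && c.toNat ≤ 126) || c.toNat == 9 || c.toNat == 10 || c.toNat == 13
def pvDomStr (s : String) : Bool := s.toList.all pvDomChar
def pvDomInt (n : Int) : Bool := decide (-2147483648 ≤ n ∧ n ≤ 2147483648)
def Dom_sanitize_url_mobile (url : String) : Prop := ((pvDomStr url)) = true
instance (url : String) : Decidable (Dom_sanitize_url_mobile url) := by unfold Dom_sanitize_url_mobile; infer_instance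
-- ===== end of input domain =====

-- B replaces A's fifteen sequential str.replace passes with one filtering pass over the
-- characters against a set; return values are proved equal on all inputs.

-- ===== PORT A =====
def dangerousCharsA : List Char :=
  ['<', '>', '"', '\'', '&', '%', '$', '#', '{', '}', '[', ']', '\\', '^', '`']

-- url.rstrip('/'): ported by hand (PySem has no right-strip with a chars argument);
-- exact: drops exactly the maximal trailing run of '/' characters.
def rstripSlash (s : List Char) : List Char :=
  (s.reverse.dropWhile (· == '/')).reverse

def sanitize_url_mobile (url : String) : String :=
  if url = "" then ""
  else
    let u1 := PySem.Chars.strip url.toList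
    let u2 := dangerousCharsA.foldl (fun s c => PySem.Chars.replace s [c] []) u1
    let u3 :=
      if !(PySem.Chars.startswith u2 "http://".toList ||
           PySem.Chars.startswith u2 "https://".toList) then
        "http://".toList ++ u2
      else u2
    String.ofList (rstripSlash u3)

-- ===== PORT B =====
def dangerousSetB : List Char := "<>\"'&%$#{}[]\\^`".toList

def sanitize_url_mobile_alt (url : String) : String :=
  if url = "" then ""
  else
    let cleaned := (PySem.Chars.strip url.toList).filter (fun c => !dangerousSetB.contains c)
    let u :=
      if !(PySem.Chars.startswith cleaned "http://".toList ||
           PySem.Chars.startswith cleaned "https://".toList) then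
        "http://".toList ++ cleaned
      else cleaned
    String.ofList ((u.reverse.dropWhile (· == '/')).reverse)

-- ===== PRECONDITION & SPEC =====
def Spec_sanitize_url_mobile (url : String) (out : String) : Prop := out = sanitize_url_mobile_alt url
instance (url : String) (out : String) : Decidable (Spec_sanitize_url_mobile url out) := by unfold Spec_sanitize_url_mobile; infer_instance

-- ===== CLAIM (what is proved, stated in full; the proofs are below) =====
def Claim_equal_sanitize_url_mobile : Prop := ∀ (url : String), Dom_sanitize_url_mobile url → Spec_sanitize_url_mobile url (sanitize_url_mobile url)

-- ===== LEMMAS AND PROOFS =====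

-- replace.go with a single-character pattern and empty replacement just drops that character
theorem replace_go_single (c : Char) (fuel : Nat) (l acc : List Char) (h : l.length ≤ fuel) :
    PySem.Chars.replace.go [c] [] fuel l acc = acc.reverse ++ l.filter (· ≠ c) := by
  induction fuel generalizing l acc with
  | zero =>
    cases l with
    | nil => simp [PySem.Chars.replace.go]
    | cons a t => simp at h
  | succ n ih =>
    cases l with
    | nil => simp [PySem.Chars.replace.go]
    | cons a t =>
      simp only [List.length_cons, Nat.succ_le_succ_iff] at h
      by_cases hac : a = c
      · subst hac
        have hp : List.isPrefixOf [a] (a :: t) = true := by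
          simp [List.isPrefixOf]
        simp [PySem.Chars.replace.go, hp, ih t acc h, List.filter]
      · have hp : List.isPrefixOf [c] (a :: t) = false := by
          simp [List.isPrefixOf]; exact fun hh => hac hh.symm
        simp [PySem.Chars.replace.go, hp, ih t (a :: acc) h, List.filter, hac]

theorem replace_single (s : List Char) (c : Char) :
    PySem.Chars.replace s [c] [] = s.filter (· ≠ c) := by
  have h := replace_go_single c s.length s [] le_rfl
  simpa [PySem.Chars.replace] using h

-- folding single-character deletions over a list of characters is one filter pass
theorem foldl_replace_eq_filter (chars : List Char) (s : List Char) :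
    chars.foldl (fun s c => PySem.Chars.replace s [c] []) s
      = s.filter (fun ch => !chars.contains ch) := by
  induction chars generalizing s with
  | nil => simp
  | cons c cs ih =>
    rw [List.foldl_cons, replace_single, ih, List.filter_filter]
    apply List.filter_congr
    intro x _
    by_cases hx : x = c <;> simp [hx]

-- ===== VERDICT (by name: the statement is the Claim_ definition above) =====
theorem sanitize_url_mobile_spec : Claim_equal_sanitize_url_mobile := by
  intro url _
  unfold Spec_sanitize_url_mobile sanitize_url_mobile sanitize_url_mobile_alt
  by_cases h : url = ""
  · simp [h]
  · simp only [h, if_false, rstripSlash, foldl_replace_eq_filter, dangerousCharsA, dangerousSetB]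
    rfl
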